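-- pv_equiv track=rewrite | github.com/GimYoungPhil/Cracking_Codes_with_Python | src/ch20/hacker.py | getMostCommonFactors
-- ===== SOURCE A (Python) =====
-- def getItemAtIndexOne(items):
--     return items[1]
--
-- def getMostCommonFactors(seqFactors):
--
--     factorCounts = {}
--
--     for seq in seqFactors:
--         factorList = seqFactors[seq]
--         for factor in factorList:
--             if factor not in factorCounts:
--                 factorCounts[factor] = 0
--             factorCounts[factor] += 1
--
--     factorsByCount = []
--     for factor in factorCounts:
--         factorsByCount.append((factor, factorCounts[factor]))
--
--     factorsByCount.sort(key=getItemAtIndexOne, reverse=True)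
--
--     return factorsByCount
-- ===== SOURCE B (Python) =====
-- def getMostCommonFactors(seqFactors):
--     # Counting sort by frequency instead of a comparison sort.
--     counts = {}
--     for factorList in seqFactors.values():
--         for factor in factorList:
--             counts[factor] = counts.get(factor, 0) + 1
--
--     buckets = {}
--     for factor, count in counts.items():
--         buckets.setdefault(count, []).append(factor)
--
--     maxCount = max(buckets, default=0)
--     result = []
--     for count in range(maxCount, 0, -1):
--         for factor in buckets.get(count, []):
--             result.append((factor, count))
--     return result
-- ===== Notes on version B (the rewrite author's own statement) =====
-- stated objective: alternative
-- what changed: B replaces A's stable comparison sort of (factor,count) pairs by a counting sort: it groups factors into buckets keyed by their count and emits buckets from the maximum count down to 1, preserving first-encounter order within ties.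
import Mathlib
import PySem

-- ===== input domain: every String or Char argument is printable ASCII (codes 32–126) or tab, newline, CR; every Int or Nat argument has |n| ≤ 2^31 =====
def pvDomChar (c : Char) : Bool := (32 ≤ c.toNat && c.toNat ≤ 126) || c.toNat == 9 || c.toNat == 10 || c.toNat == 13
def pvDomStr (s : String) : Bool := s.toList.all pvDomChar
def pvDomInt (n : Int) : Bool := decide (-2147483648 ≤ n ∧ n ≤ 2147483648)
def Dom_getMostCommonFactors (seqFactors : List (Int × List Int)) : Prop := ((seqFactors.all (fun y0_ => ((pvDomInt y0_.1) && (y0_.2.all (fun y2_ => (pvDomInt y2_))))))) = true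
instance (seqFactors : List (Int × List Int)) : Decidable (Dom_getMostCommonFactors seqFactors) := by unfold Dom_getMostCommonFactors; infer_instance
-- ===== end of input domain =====

-- B replaces A's stable comparison sort by a counting sort over frequency buckets (different algorithm, same output).


-- ===== PORT A =====
-- The Python parameter is a dict[int, list[int]]; PySem.Dict.ofList mirrors Python's
-- dict construction from the association list (duplicate keys overwrite in place).
def getMostCommonFactors (seqFactors : List (Int × List Int)) : List (Int × Int) :=
  let d := PySem.Dict.ofList seqFactors
  let factorCounts : PySem.Dict Int Int :=
    d.keys.foldl (fun factorCounts seq =>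
      let factorList := d.getD seq []
      factorList.foldl (fun factorCounts factor =>
        let factorCounts := if factorCounts.contains factor then factorCounts
                            else factorCounts.insert factor 0
        factorCounts.insert factor (factorCounts.getD factor 0 + 1)) factorCounts)
      PySem.Dict.empty
  let factorsByCount : List (Int × Int) :=
    factorCounts.keys.foldl (fun acc factor => acc ++ [(factor, factorCounts.getD factor 0)]) []
  PySem.List.sorted factorsByCount (fun items => items.2) true

-- ===== PORT B =====
def getMostCommonFactors_alt (seqFactors : List (Int × List Int)) : List (Int × Int) :=
  let d := PySem.Dict.ofList seqFactors
  let counts : PySem.Dict Int Int :=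
    d.values.foldl (fun counts factorList =>
      factorList.foldl (fun counts factor =>
        counts.insert factor (counts.getD factor 0 + 1)) counts)
      PySem.Dict.empty
  let buckets : PySem.Dict Int (List Int) :=
    counts.items.foldl (fun buckets p => buckets.modify p.2 [] (· ++ [p.1])) PySem.Dict.empty
  let maxCount : Int :=
    match buckets.keys with
    | [] => 0
    | k :: ks => ks.foldl max k
  (PySem.List.pyRange maxCount 0 (-1)).foldl (fun result count =>
    (buckets.getD count []).foldl (fun result factor => result ++ [(factor, count)]) result) []

-- ===== PRECONDITION & SPEC =====
def Spec_getMostCommonFactors (seqFactors : List (Int × List Int)) (out : List (Int × Int)) : Prop := out = getMostCommonFactors_alt seqFactors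
instance (seqFactors : List (Int × List Int)) (out : List (Int × Int)) : Decidable (Spec_getMostCommonFactors seqFactors out) := by unfold Spec_getMostCommonFactors; infer_instance

-- ===== CLAIM (what is proved, stated in full; the proofs are below) =====
def Claim_equal_getMostCommonFactors : Prop := ∀ (seqFactors : List (Int × List Int)), Dom_getMostCommonFactors seqFactors → Spec_getMostCommonFactors seqFactors (getMostCommonFactors seqFactors)

-- ===== LEMMAS AND PROOFS =====

-- One step of A's counting loop equals one step of B's counting loop.
theorem count_step_eq (fc : PySem.Dict Int Int) (factor : Int) :
    (let fc' := if fc.contains factor then fc else fc.insert factor 0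
     fc'.insert factor (fc'.getD factor 0 + 1)) = fc.insert factor (fc.getD factor 0 + 1) := by
  by_cases h : fc.contains factor = true
  · simp [h]
  · simp only [Bool.not_eq_true] at h
    simp [h, PySem.Dict.getD_insert_self, PySem.Dict.insert_insert_self,
      PySem.Dict.getD_of_not_contains fc 0 h]

-- Both counting loops compute Counter(flatten of the dict's value lists).
theorem counts_eq (d : PySem.Dict Int (List Int)) (hnd : d.keys.Nodup) :
    d.keys.foldl (fun factorCounts seq =>
        (d.getD seq []).foldl (fun factorCounts factor =>
          let factorCounts := if factorCounts.contains factor then factorCounts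
                              else factorCounts.insert factor 0
          factorCounts.insert factor (factorCounts.getD factor 0 + 1)) factorCounts)
        PySem.Dict.empty
    = PySem.Dict.counter d.values.flatten := by
  rw [← PySem.Dict.foldl_insert_getD_add_one_eq_counter, List.foldl_flatten,
    PySem.Dict.values_eq_map_keys d hnd [], List.foldl_map]
  refine PySem.List.foldl_congr_mem _ _ _ _ ?_
  intro acc x hx
  refine PySem.List.foldl_congr_mem _ _ _ _ ?_
  intro acc' y hy'
  exact count_step_eq acc' y

-- insertBy skips a prefix no element of which triggers insertion.
theorem insertBy_append_of_not_before {α : Type} (before : α → α → Bool) (x : α)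
    (ys zs : List α) (h : ∀ y ∈ ys, before x y = false) :
    PySem.List.insertBy before x (ys ++ zs) = ys ++ PySem.List.insertBy before x zs := by
  induction ys with
  | nil => rfl
  | cons y ys ih =>
      simp only [List.cons_append, PySem.List.insertBy, h y (by simp)]
      simp only [Bool.false_eq_true, if_false, List.cons.injEq, true_and]
      exact ih (fun y hy => h y (by simp [hy]))

-- insertBy puts x in front when every element triggers insertion (or the list is empty).
theorem insertBy_cons_of_before {α : Type} (before : α → α → Bool) (x : α)
    (zs : List α) (h : ∀ y ∈ zs, before x y = true) :
    PySem.List.insertBy before x zs = x :: zs := by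
  cases zs with
  | nil => rfl
  | cons z zs => simp [PySem.List.insertBy, h z (by simp)]

-- Splitting a descending range.
theorem pyRange_neg_one_split (m c : Int) (h1 : 0 ≤ c) (h2 : c ≤ m) :
    PySem.List.pyRange m 0 (-1) = PySem.List.pyRange m c (-1) ++ PySem.List.pyRange c 0 (-1) := by
  rw [PySem.List.pyRange_neg_one_eq_reverse, PySem.List.pyRange_neg_one_eq_reverse,
    PySem.List.pyRange_neg_one_eq_reverse,
    PySem.List.pyRange_one_append (0 + 1) (c + 1) (m + 1) (by omega) (by omega),
    List.reverse_append]

-- Stable reverse sort by the second component = descending bucket concatenation.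
theorem sorted_rev_eq_buckets (l : List (Int × Int)) (m : Int)
    (h : ∀ p ∈ l, 1 ≤ p.2 ∧ p.2 ≤ m) :
    PySem.List.sorted l (fun p => p.2) true
      = (PySem.List.pyRange m 0 (-1)).flatMap (fun c => l.filter (fun p => p.2 == c)) := by
  induction l using List.reverseRecOn with
  | nil => simp [PySem.List.sorted]
  | append_singleton l p ih =>
      have hp := h p (by simp)
      have hl : ∀ q ∈ l, 1 ≤ q.2 ∧ q.2 ≤ m := fun q hq => h q (by simp [hq])
      rw [PySem.List.sorted_rev_eq_foldl_insertBy, List.foldl_append, List.foldl_cons,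
        List.foldl_nil, ← PySem.List.sorted_rev_eq_foldl_insertBy, ih hl]
      have hsplit := pyRange_neg_one_split m p.2 (by omega) (by omega)
      have hsplit2 : PySem.List.pyRange p.2 0 (-1)
          = p.2 :: PySem.List.pyRange (p.2 - 1) 0 (-1) :=
        PySem.List.pyRange_neg_one_cons (by omega)
      rw [hsplit, List.flatMap_append, List.flatMap_append, hsplit2, List.flatMap_cons,
        List.flatMap_cons]
      -- filters over l ++ [p]
      have hfhi : ∀ c ∈ PySem.List.pyRange m p.2 (-1),
          (l ++ [p]).filter (fun q => q.2 == c) = l.filter (fun q => q.2 == c) := by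
        intro c hc
        rw [PySem.List.mem_pyRange_neg_one] at hc
        simp [List.filter_append, show ¬(p.2 = c) by omega]
      have hflo : ∀ c ∈ PySem.List.pyRange (p.2 - 1) 0 (-1),
          (l ++ [p]).filter (fun q => q.2 == c) = l.filter (fun q => q.2 == c) := by
        intro c hc
        rw [PySem.List.mem_pyRange_neg_one] at hc
        simp [List.filter_append, show ¬(p.2 = c) by omega]
      rw [List.flatMap_congr hfhi, List.flatMap_congr hflo]
      have hfp : (l ++ [p]).filter (fun q => q.2 == p.2)
          = l.filter (fun q => q.2 == p.2) ++ [p] := by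
        simp [List.filter_append]
      rw [hfp]
      -- now move p through by insertBy lemmas
      rw [insertBy_append_of_not_before _ p _ _ (by
        intro y hy
        rw [List.mem_flatMap] at hy
        obtain ⟨c, hc, hyc⟩ := hy
        rw [PySem.List.mem_pyRange_neg_one] at hc
        rw [List.mem_filter, beq_iff_eq] at hyc
        simp only [decide_eq_false_iff_not]
        omega)]
      rw [insertBy_append_of_not_before _ p _ _ (by
        intro y hy
        rw [List.mem_filter, beq_iff_eq] at hy
        simp only [decide_eq_false_iff_not]
        omega)]
      rw [insertBy_cons_of_before _ p _ (by
        intro y hy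
        rw [List.mem_flatMap] at hy
        obtain ⟨c, hc, hyc⟩ := hy
        rw [PySem.List.mem_pyRange_neg_one] at hc
        rw [List.mem_filter, beq_iff_eq] at hyc
        simp only [decide_eq_true_eq]
        omega)]
      simp

-- A bucket of B holds exactly the first components of the items with that count.
theorem bucket_getD (items : List (Int × Int)) (c : Int) :
    (items.foldl (fun buckets p => buckets.modify p.2 [] (· ++ [p.1]))
        (PySem.Dict.empty : PySem.Dict Int (List Int))).getD c []
    = (items.filter (fun p => p.2 == c)).map (fun p => p.1) := by
  have : items.foldl (fun buckets p => buckets.modify p.2 [] (· ++ [p.1]))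
        (PySem.Dict.empty : PySem.Dict Int (List Int))
      = (items.map (fun p => (p.2, p.1))).foldl
          (fun buckets p => buckets.modify p.1 [] (· ++ [p.2])) PySem.Dict.empty := by
    rw [List.foldl_map]
  rw [this, PySem.Dict.getD_foldl_modify_append, List.filter_map]
  simp [List.map_map, Function.comp_def]

-- final assembly
theorem getMostCommonFactors_eq (seqFactors : List (Int × List Int)) :
    getMostCommonFactors seqFactors = getMostCommonFactors_alt seqFactors := by
  unfold getMostCommonFactors getMostCommonFactors_alt
  set d := PySem.Dict.ofList seqFactors with hd
  have hnd : d.keys.Nodup := PySem.Dict.nodup_keys_ofList seqFactors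
  set F := d.values.flatten with hF
  -- the two counting dicts agree
  have hcount := counts_eq d hnd
  have hcountB : d.values.foldl (fun counts factorList =>
      factorList.foldl (fun counts factor =>
        counts.insert factor (counts.getD factor 0 + 1)) counts) PySem.Dict.empty
      = PySem.Dict.counter F := by
    rw [hF, ← List.foldl_flatten, PySem.Dict.foldl_insert_getD_add_one_eq_counter]
  simp only [hcount, hcountB]
  -- A's pair list is the counter's items list
  rw [PySem.List.foldl_append_singleton_eq_map, List.nil_append,
    ← PySem.Dict.items_eq_map_keys _ (PySem.Dict.nodup_keys_counter F) 0]
  set items := (PySem.Dict.counter F).items with hitems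
  -- B's maxCount bounds every count, and counts are ≥ 1
  set buckets := items.foldl (fun buckets p => buckets.modify p.2 [] (· ++ [p.1]))
      (PySem.Dict.empty : PySem.Dict Int (List Int)) with hbuckets
  set maxCount : Int := (match buckets.keys with
    | [] => 0
    | k :: ks => ks.foldl max k) with hmax
  have hkeys : ∀ c, c ∈ buckets.keys ↔ c ∈ items.map (fun p => p.2) := by
    intro c
    rw [hbuckets, show (fun (buckets : PySem.Dict Int (List Int)) (p : Int × Int) =>
        buckets.modify p.2 [] (· ++ [p.1]))
      = (fun buckets p => buckets.modify ((fun (q : Int × Int) => q.2) p) []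
          ((fun (_ : PySem.Dict Int (List Int)) (q : Int × Int) (v : List Int) => v ++ [q.1])
            buckets p)) from rfl,
      PySem.Dict.keys_foldl_modify_key items (fun p => p.2) [] _ PySem.Dict.empty]
    rw [show (PySem.Dict.empty : PySem.Dict Int (List Int)).keys = ([] : List Int) from rfl]
    rw [PySem.Set.mem_update]
    simp
  have hbound : ∀ p ∈ items, 1 ≤ p.2 ∧ p.2 ≤ maxCount := by
    intro p hp
    have hmem : p.2 ∈ buckets.keys := (hkeys p.2).mpr (List.mem_map_of_mem hp)
    constructor
    · rw [hitems, PySem.Dict.items_counter] at hp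
      rw [List.mem_map] at hp
      obtain ⟨k, hk, hpk⟩ := hp
      rw [PySem.Set.mem_ofList] at hk
      have := List.count_pos_iff.mpr hk
      have h2 : p.2 = (F.count k : Int) := by rw [← hpk]
      omega
    · rw [hmax]
      cases hkv : buckets.keys with
      | nil => rw [hkv] at hmem; simp at hmem
      | cons k ks =>
          rw [hkv] at hmem
          rcases List.mem_cons.mp hmem with h | h
          · subst h; exact (PySem.List.le_foldl_max ks p.2).1
          · exact (PySem.List.le_foldl_max ks k).2 p.2 h
  -- rewrite B's output loops as a flatMap of buckets, then buckets as filters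
  rw [show (PySem.List.pyRange maxCount 0 (-1)).foldl (fun result count =>
      (buckets.getD count []).foldl (fun result factor => result ++ [(factor, count)]) result) []
    = (PySem.List.pyRange maxCount 0 (-1)).flatMap
        (fun c => (buckets.getD c []).map (fun f => (f, c))) by
    rw [show (fun (result : List (Int × Int)) count =>
        (buckets.getD count []).foldl (fun result factor => result ++ [(factor, count)]) result)
      = (fun result count => result ++ (buckets.getD count []).map (fun f => (f, count))) by
        funext result count
        rw [PySem.List.foldl_append_singleton_eq_map]]
    rw [PySem.List.foldl_append_eq_flatMap, List.nil_append]]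
  rw [sorted_rev_eq_buckets items maxCount hbound]
  refine List.flatMap_congr ?_
  intro c _
  rw [hbuckets, bucket_getD items c, List.map_map]
  refine ((List.map_congr_left ?_).trans (List.map_id _)).symm
  intro p hp
  rw [List.mem_filter, beq_iff_eq] at hp
  simp only [Function.comp_apply, id_eq, ← hp.2]

-- ===== VERDICT (by name: the statement is the Claim_ definition above) =====
theorem getMostCommonFactors_spec : Claim_equal_getMostCommonFactors := by
  intro seqFactors _
  unfold Spec_getMostCommonFactors
  exact getMostCommonFactors_eq seqFactors
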